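-- pv_equiv track=rewrite | github.com/SvobodinF/kurdyukovAA | Lesson_8/ex-1.py | convert
-- ===== SOURCE A (Python) =====
-- def convert(count):
--     result = {}
--
--     for i in range(1,count + 1):
--         number = i
--         value = ""
--
--         while number > 0:
--             value = str(number % 2) + value
--             number = number // 2
--
--         if (str(value) == str(value)[::-1]):
--             result[i] = value
--
--     return result.keys()
-- ===== SOURCE B (Python) =====
-- def convert(count):
--     result = []
--     for i in range(1, count + 1):
--         n = i
--         r = 0
--         while n > 0:
--             r = 2 * r + n % 2
--             n = n // 2
--         if r == i:
--             result.append(i)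
--     return result
-- ===== Notes on version B (the rewrite author's own statement) =====
-- stated objective: faster
-- what changed: B replaces A's per-number binary-string construction, string-slice reversal and dict bookkeeping with a pure integer bit-reversal accumulator (r = 2r + n%2) compared against i, appending matches to a plain list.
import Mathlib
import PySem

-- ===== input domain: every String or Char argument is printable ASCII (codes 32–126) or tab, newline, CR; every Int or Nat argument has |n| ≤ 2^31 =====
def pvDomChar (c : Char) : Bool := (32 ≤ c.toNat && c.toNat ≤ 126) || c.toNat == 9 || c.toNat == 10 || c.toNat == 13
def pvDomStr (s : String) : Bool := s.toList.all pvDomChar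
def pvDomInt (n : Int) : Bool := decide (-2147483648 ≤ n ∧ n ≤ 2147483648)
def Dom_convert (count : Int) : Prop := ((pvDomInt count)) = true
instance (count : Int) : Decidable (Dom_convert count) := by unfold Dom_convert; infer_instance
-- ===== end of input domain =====

-- B replaces A's binary-string building, slice reversal and dict with an integer bit-reversal
-- accumulator and a plain result list (objective: alternative). Python A returns a dict_keys view;
-- both ports return its contents as a List Int.

-- ===== PORT A =====
-- the while loop: value = str(number % 2) + value; number = number // 2 (strings as code-point lists)
def pvBitsA (number : Int) (value : List Char) : List Char :=
  if h : 0 < number then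
    pvBitsA (PySem.Int.floordiv number 2) (PySem.Int.toChars (PySem.Int.mod number 2) ++ value)
  else value
termination_by number.toNat
decreasing_by
  simp only [PySem.Int.floordiv]
  rw [Int.fdiv_eq_ediv]
  simp
  omega

-- str(value) on a str is value itself; value[::-1] is PySem.List.slice? value none none (-1)
def convert (count : Int) : List Int :=
  ((PySem.List.pyRange 1 (count + 1) 1).foldl
    (fun result i =>
      let value := pvBitsA i []
      if some value == PySem.List.slice? value none none (-1) then result.insert i value
      else result)
    (PySem.Dict.empty : PySem.Dict Int (List Char))).keys

-- ===== PORT B =====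
-- the while loop: r = 2 * r + n % 2; n = n // 2
def pvRevB (n r : Int) : Int :=
  if h : 0 < n then pvRevB (PySem.Int.floordiv n 2) (2 * r + PySem.Int.mod n 2) else r
termination_by n.toNat
decreasing_by
  simp only [PySem.Int.floordiv]
  rw [Int.fdiv_eq_ediv]
  simp
  omega

def convert_alt (count : Int) : List Int :=
  (PySem.List.pyRange 1 (count + 1) 1).foldl
    (fun result i => if pvRevB i 0 == i then result ++ [i] else result) []

-- ===== PRECONDITION & SPEC =====
def Spec_convert (count : Int) (out : List Int) : Prop := out = convert_alt count
instance (count : Int) (out : List Int) : Decidable (Spec_convert count out) := by unfold Spec_convert; infer_instance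

-- ===== CLAIM (what is proved, stated in full; the proofs are below) =====
def Claim_equal_convert : Prop := ∀ (count : Int), Dom_convert count → Spec_convert count (convert count)

-- ===== LEMMAS AND PROOFS =====

-- MSB-first binary digits of a natural number
def nbits (n : Nat) : List Nat :=
  if n = 0 then [] else nbits (n / 2) ++ [n % 2]

def c01 (b : Nat) : Char := if b == 1 then '1' else '0'

def valAcc (r : Int) (l : List Nat) : Int := l.foldl (fun a b => 2 * a + (b : Int)) r

lemma nbits_zero : nbits 0 = [] := by simp [nbits]

lemma nbits_pos {n : Nat} (h : 0 < n) : nbits n = nbits (n / 2) ++ [n % 2] := by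
  rw [nbits]; simp [Nat.pos_iff_ne_zero.mp h]

lemma nbits_le_one : ∀ n, ∀ b ∈ nbits n, b ≤ 1 := by
  intro n
  induction n using Nat.strong_induction_on with
  | _ n ih =>
    by_cases h : n = 0
    · simp [h, nbits_zero]
    · rw [nbits_pos (Nat.pos_of_ne_zero h)]
      intro b hb
      rcases List.mem_append.mp hb with h1 | h1
      · exact ih (n / 2) (Nat.div_lt_self (Nat.pos_of_ne_zero h) one_lt_two) b h1
      · simp at h1; omega

lemma valAcc_cons (r : Int) (b : Nat) (l : List Nat) :
    valAcc r (b :: l) = valAcc (2 * r + b) l := rfl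

lemma valAcc_append (r : Int) (l : List Nat) (b : Nat) :
    valAcc r (l ++ [b]) = 2 * valAcc r l + b := by
  simp [valAcc]

lemma valAcc_split (l : List Nat) (r : Int) :
    valAcc r l = r * 2 ^ l.length + valAcc 0 l := by
  induction l generalizing r with
  | nil => simp [valAcc]
  | cons b l ih =>
    rw [valAcc_cons, valAcc_cons, ih, ih (2 * 0 + b)]
    simp only [List.length_cons, pow_succ]
    ring

lemma valAcc_bounds (l : List Nat) (hb : ∀ b ∈ l, b ≤ 1) :
    0 ≤ valAcc 0 l ∧ valAcc 0 l < 2 ^ l.length := by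
  induction l with
  | nil => simp [valAcc]
  | cons b l ih =>
    have hb' : ∀ x ∈ l, x ≤ 1 := fun x hx => hb x (List.mem_cons_of_mem _ hx)
    have hbl : b ≤ 1 := hb b List.mem_cons_self
    obtain ⟨h0, h1⟩ := ih hb'
    rw [valAcc_cons, valAcc_split]
    have hP : (0:Int) < 2 ^ l.length := by positivity
    have hc : ((b : Int)) ≤ 1 := by exact_mod_cast hbl
    have hc0 : (0:Int) ≤ (b:Int) := Int.natCast_nonneg b
    simp only [List.length_cons, pow_succ]
    constructor
    · nlinarith
    · nlinarith

lemma val_nbits : ∀ n : Nat, valAcc 0 (nbits n) = (n : Int) := by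
  intro n
  induction n using Nat.strong_induction_on with
  | _ n ih =>
    by_cases h : n = 0
    · simp [h, nbits_zero, valAcc]
    · rw [nbits_pos (Nat.pos_of_ne_zero h), valAcc_append,
        ih (n / 2) (Nat.div_lt_self (Nat.pos_of_ne_zero h) one_lt_two)]
      have := Nat.div_add_mod n 2
      push_cast
      omega

lemma valAcc_inj : ∀ (l1 l2 : List Nat), l1.length = l2.length →
    (∀ b ∈ l1, b ≤ 1) → (∀ b ∈ l2, b ≤ 1) →
    valAcc 0 l1 = valAcc 0 l2 → l1 = l2 := by
  intro l1
  induction l1 with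
  | nil => intro l2 hlen _ _ _; simpa using (List.length_eq_zero_iff.mp hlen.symm)
  | cons b1 l1 ih =>
    intro l2 hlen h1 h2 hv
    cases l2 with
    | nil => simp at hlen
    | cons b2 l2 =>
      simp only [List.length_cons, Nat.add_right_cancel_iff] at hlen
      have hb1 : b1 ≤ 1 := h1 b1 List.mem_cons_self
      have hb2 : b2 ≤ 1 := h2 b2 List.mem_cons_self
      have h1' : ∀ b ∈ l1, b ≤ 1 := fun x hx => h1 x (List.mem_cons_of_mem _ hx)
      have h2' : ∀ b ∈ l2, b ≤ 1 := fun x hx => h2 x (List.mem_cons_of_mem _ hx)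
      rw [valAcc_cons, valAcc_cons, valAcc_split, valAcc_split l2] at hv
      obtain ⟨ha0, ha1⟩ := valAcc_bounds l1 h1'
      obtain ⟨hc0, hc1⟩ := valAcc_bounds l2 h2'
      rw [hlen] at hv ha1
      have hP : (0:Int) < 2 ^ l2.length := by positivity
      have hbeq : b1 = b2 := by
        have e1 : (b1 : Int) ≤ 1 := by exact_mod_cast hb1
        have e2 : (b2 : Int) ≤ 1 := by exact_mod_cast hb2
        have e3 : (0:Int) ≤ (b1:Int) := Int.natCast_nonneg b1
        have e4 : (0:Int) ≤ (b2:Int) := Int.natCast_nonneg b2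
        have : (b1 : Int) = b2 := by nlinarith
        exact_mod_cast this
      subst hbeq
      have : valAcc 0 l1 = valAcc 0 l2 := by
        have : (b1:Int) * 2 ^ l2.length + valAcc 0 l1 = (b1:Int) * 2 ^ l2.length + valAcc 0 l2 := by
          omega
        omega
      rw [ih l2 hlen h1' h2' this]

lemma map_c01_inj : ∀ (l1 l2 : List Nat), (∀ b ∈ l1, b ≤ 1) → (∀ b ∈ l2, b ≤ 1) →
    l1.map c01 = l2.map c01 → l1 = l2 := by
  intro l1
  induction l1 with
  | nil => intro l2 _ _ h; cases l2 <;> simp_all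
  | cons b1 l1 ih =>
    intro l2 h1 h2 h
    cases l2 with
    | nil => simp at h
    | cons b2 l2 =>
      simp only [List.map_cons, List.cons.injEq] at h
      have hb1 : b1 ≤ 1 := h1 b1 List.mem_cons_self
      have hb2 : b2 ≤ 1 := h2 b2 List.mem_cons_self
      have hbeq : b1 = b2 := by
        interval_cases b1 <;> interval_cases b2 <;> simp_all [c01]
      subst hbeq
      rw [ih l2 (fun x hx => h1 x (List.mem_cons_of_mem _ hx))
        (fun x hx => h2 x (List.mem_cons_of_mem _ hx)) h.2]

lemma floordiv2_toNat (n : Int) (h : 0 < n) :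
    (PySem.Int.floordiv n 2).toNat = n.toNat / 2 ∧ (PySem.Int.floordiv n 2).toNat < n.toNat := by
  simp only [PySem.Int.floordiv]
  rw [Int.fdiv_eq_ediv]
  simp
  omega

lemma mod2_eq (n : Int) : PySem.Int.mod n 2 = n % 2 := by
  simp [PySem.Int.mod, Int.fmod_eq_emod]

lemma toChars_mod2 (n : Int) (h : 0 < n) :
    PySem.Int.toChars (PySem.Int.mod n 2) = [c01 (n.toNat % 2)] := by
  rw [mod2_eq]
  rcases Int.emod_two_eq n with he | he
  · rw [he]
    have h2 : n.toNat % 2 = 0 := by omega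
    rw [h2]; rfl
  · rw [he]
    have h2 : n.toNat % 2 = 1 := by omega
    rw [h2]; rfl

lemma pvBitsA_eq (n : Int) (acc : List Char) :
    pvBitsA n acc = (nbits n.toNat).map c01 ++ acc := by
  have H : ∀ (m : Nat) (n : Int), n.toNat = m → ∀ acc : List Char,
      pvBitsA n acc = (nbits n.toNat).map c01 ++ acc := by
    intro m
    induction m using Nat.strong_induction_on with
    | _ m ih =>
      intro n hm acc
      rw [pvBitsA.eq_def]
      by_cases h : 0 < n
      · obtain ⟨hdiv, hlt⟩ := floordiv2_toNat n h
        rw [dif_pos h, ih _ (hm ▸ hlt) _ rfl, hdiv,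
          nbits_pos (show 0 < n.toNat by omega), toChars_mod2 n h]
        simp
      · have h0 : n.toNat = 0 := by omega
        rw [dif_neg h, h0, nbits_zero]
        simp
  exact H n.toNat n rfl acc

lemma pvRevB_eq (n r : Int) : pvRevB n r = valAcc r ((nbits n.toNat).reverse) := by
  have H : ∀ (m : Nat) (n : Int), n.toNat = m → ∀ r : Int,
      pvRevB n r = valAcc r ((nbits n.toNat).reverse) := by
    intro m
    induction m using Nat.strong_induction_on with
    | _ m ih =>
      intro n hm r
      rw [pvRevB.eq_def]
      by_cases h : 0 < n
      · obtain ⟨hdiv, hlt⟩ := floordiv2_toNat n h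
        rw [dif_pos h, ih _ (hm ▸ hlt) _ rfl, hdiv,
          nbits_pos (show 0 < n.toNat by omega), List.reverse_append]
        simp only [List.reverse_singleton, List.singleton_append, valAcc_cons]
        congr 2
        rw [mod2_eq]
        omega
      · have h0 : n.toNat = 0 := by omega
        rw [dif_neg h, h0, nbits_zero]
        simp [valAcc]
  exact H n.toNat n rfl r

-- the two Boolean tests agree for every i ≥ 1
lemma cond_iff (i : Int) (h : 0 < i) :
    (some (pvBitsA i []) == PySem.List.slice? (pvBitsA i []) none none (-1)) =
    (pvRevB i 0 == i) := by
  have hv : pvBitsA i [] = (nbits i.toNat).map c01 := by rw [pvBitsA_eq]; simp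
  have hbits : ∀ b ∈ nbits i.toNat, b ≤ 1 := nbits_le_one i.toNat
  have hbitsR : ∀ b ∈ (nbits i.toNat).reverse, b ≤ 1 := by simpa using hbits
  have hval : valAcc 0 (nbits i.toNat) = (i.toNat : Int) := val_nbits i.toNat
  have hi : (i.toNat : Int) = i := by omega
  have hrev : pvRevB i 0 = valAcc 0 ((nbits i.toNat).reverse) := pvRevB_eq i 0
  have key : (pvBitsA i [] = (pvBitsA i []).reverse) ↔ (pvRevB i 0 = i) := by
    rw [hv, ← List.map_reverse, hrev]
    constructor
    · intro he
      have hL : nbits i.toNat = (nbits i.toNat).reverse := map_c01_inj _ _ hbits hbitsR he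
      rw [← hL, hval, hi]
    · intro he
      have hvv : valAcc 0 ((nbits i.toNat).reverse) = valAcc 0 (nbits i.toNat) := by
        rw [he, hval, hi]
      have hL : (nbits i.toNat).reverse = nbits i.toNat :=
        valAcc_inj _ _ List.length_reverse hbitsR hbits hvv
      rw [hL]
  rw [PySem.List.slice?_none_none_neg_one, Bool.eq_iff_iff]
  simp only [beq_iff_eq, Option.some.injEq]
  exact key

-- keys of A's conditional-insert loop over fresh distinct keys
lemma keys_loop : ∀ (xs : List Int) (d : PySem.Dict Int (List Char)), xs.Nodup →
    (∀ x ∈ xs, d.contains x = false) →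
    (xs.foldl
      (fun result i =>
        let value := pvBitsA i []
        if some value == PySem.List.slice? value none none (-1) then result.insert i value
        else result) d).keys
    = d.keys ++ xs.filter (fun i =>
        some (pvBitsA i []) == PySem.List.slice? (pvBitsA i []) none none (-1)) := by
  intro xs
  induction xs with
  | nil => intro d _ _; simp
  | cons x xs ih =>
    intro d hnd hfresh
    have hx : d.contains x = false := hfresh x List.mem_cons_self
    have hnd' : xs.Nodup := hnd.of_cons
    have hxnot : x ∉ xs := (List.nodup_cons.mp hnd).1
    simp only [List.foldl_cons, List.filter_cons]
    by_cases hc : (some (pvBitsA x []) == PySem.List.slice? (pvBitsA x []) none none (-1)) = true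
    · simp only [hc, if_true]
      rw [ih (d.insert x (pvBitsA x [])) hnd' ?_]
      · rw [PySem.Dict.keys_insert_of_not_contains]
        · simp
        · exact hx
      · intro y hy
        rw [PySem.Dict.contains_insert]
        have hne : (y == x) = false := by
          simp only [beq_eq_false_iff_ne]; intro he; exact hxnot (he ▸ hy)
        simp [hne, hfresh y (List.mem_cons_of_mem _ hy)]
    · simp only [Bool.not_eq_true] at hc
      simp only [hc, Bool.false_eq_true, if_false]
      exact ih d hnd' (fun y hy => hfresh y (List.mem_cons_of_mem _ hy))

lemma convert_eq_filter (count : Int) :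
    convert count = (PySem.List.pyRange 1 (count + 1) 1).filter (fun i =>
      some (pvBitsA i []) == PySem.List.slice? (pvBitsA i []) none none (-1)) := by
  rw [convert, keys_loop _ _ (PySem.List.nodup_pyRange_one 1 (count + 1))
    (fun x _ => by simp)]
  simp

lemma convert_alt_eq_filter (count : Int) :
    convert_alt count = (PySem.List.pyRange 1 (count + 1) 1).filter (fun i => pvRevB i 0 == i) := by
  rw [convert_alt, PySem.List.foldl_append_if_eq_filter]
  simp

-- ===== VERDICT (by name: the statement is the Claim_ definition above) =====
theorem convert_spec : Claim_equal_convert := by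
  intro count _
  unfold Spec_convert
  rw [convert_eq_filter, convert_alt_eq_filter]
  apply List.filter_congr
  intro i hi
  have h1 : 1 ≤ i := ((PySem.List.mem_pyRange_one).mp hi).1
  exact cond_iff i (by omega)
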